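-- pv_equiv track=rewrite | github.com/yesiamjulie/pyAlgorithm | AlgoTest/StackReplacement.py | solution
-- ===== SOURCE A (Python) =====
-- def solution(arrangement):
--     answer = 0
--     arrangement = arrangement.replace("()","L")
--     lst = []
--     for idx, c in enumerate(arrangement):
--         if c == '(':
--             lst.append('(')
--             answer += 1
--         elif c == ')':
--             lst.pop()
--         else:
--             answer += len(lst)
--     return answer
-- ===== SOURCE B (Python) =====
-- def solution(arrangement):
--     answer = 0
--     depth = 0
--     prev = ''
--     for c in arrangement:
--         if c == '(':
--             depth += 1
--             answer += 1
--         elif c == ')':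
--             depth -= 1
--             if prev == '(':
--                 answer += depth - 1
--         else:
--             answer += depth
--         prev = c
--     return answer
-- ===== Notes on version B (the rewrite author's own statement) =====
-- stated objective: simpler
-- what changed: B removes both the str.replace preprocessing copy and the stack list: a single scan with an int depth counter and a lookbehind on the previous character, crediting a laser pair with depth-1 at its ')' so no list is ever built.
import Mathlib
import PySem

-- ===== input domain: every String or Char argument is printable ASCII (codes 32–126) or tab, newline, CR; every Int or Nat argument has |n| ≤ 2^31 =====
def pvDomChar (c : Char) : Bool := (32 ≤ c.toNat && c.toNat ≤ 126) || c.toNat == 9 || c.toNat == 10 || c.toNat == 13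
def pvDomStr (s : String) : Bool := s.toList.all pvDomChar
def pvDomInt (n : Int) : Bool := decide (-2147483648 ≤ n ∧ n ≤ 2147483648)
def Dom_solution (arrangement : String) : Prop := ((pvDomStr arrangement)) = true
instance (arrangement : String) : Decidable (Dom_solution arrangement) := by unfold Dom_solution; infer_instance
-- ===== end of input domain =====

-- B removes A's str.replace("()","L") copy and its stack list, scanning once with an int depth
-- counter and a lookbehind on the previous character (objective: simpler — no list, no copy).


-- ===== PORT A =====
-- A's loop body; state = none once lst.pop() has raised IndexError (Python never returns then;
-- those inputs are excluded by Pre_solution, the port yields the junk value 0 there).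
def pvStepA (st : Option (Int × List Char)) (c : Char) : Option (Int × List Char) :=
  match st with
  | none => none
  | some (answer, lst) =>
    if c = '(' then some (answer + 1, lst ++ ['('])
    else if c = ')' then
      match PySem.List.pop? lst with
      | none => none
      | some (_, lst') => some (answer, lst')
    else some (answer + (lst.length : Int), lst)

def solution (arrangement : String) : Int :=
  let arrangement := PySem.Str.replace arrangement "()" "L"
  match arrangement.toList.foldl pvStepA (some ((0 : Int), ([] : List Char))) with
  | some (answer, _) => answer
  | none => 0

-- ===== PORT B =====
-- B's for-loop as structural recursion over the characters; state = (prev, depth, answer);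
-- prev : Option Char ports the Python variable that is '' before the first iteration.
def pvLoopB : List Char → Option Char → Int → Int → Int
  | [], _, _, answer => answer
  | c :: t, prev, depth, answer =>
    if c = '(' then pvLoopB t (some c) (depth + 1) (answer + 1)
    else if c = ')' then
      pvLoopB t (some c) (depth - 1)
        (if prev = some '(' then answer + ((depth - 1) - 1) else answer)
    else pvLoopB t (some c) depth (answer + depth)

def solution_alt (arrangement : String) : Int :=
  pvLoopB arrangement.toList none 0 0

-- ===== PRECONDITION & SPEC =====
-- Pre_solution excludes exactly the inputs on which A raises IndexError (lst.pop() on an empty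
-- list): it requires that strictly more '(' than ')' precede every ')' of the input.
def Pre_solution (arrangement : String) : Prop :=
  ∀ i < arrangement.toList.length, arrangement.toList.getD i ' ' = ')' →
    (arrangement.toList.take i).count ')' < (arrangement.toList.take i).count '('
instance (arrangement : String) : Decidable (Pre_solution arrangement) := by
  unfold Pre_solution; infer_instance

def pvWitness_solution : String := "(() ()x)"

def Spec_solution (arrangement : String) (out : Int) : Prop := out = solution_alt arrangement
instance (arrangement : String) (out : Int) : Decidable (Spec_solution arrangement out) := by
  unfold Spec_solution; infer_instance

-- ===== CLAIM (what is proved, stated in full; the proofs are below) =====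
def Claim_equal_solution : Prop := ∀ (arrangement : String), Dom_solution arrangement → Pre_solution arrangement → Spec_solution arrangement (solution arrangement)

-- ===== LEMMAS AND PROOFS =====

-- the effect of A's replace("()","L") on the character list
def pvRep : List Char → List Char
  | [] => []
  | [c] => [c]
  | c :: d :: t => if c = '(' ∧ d = ')' then 'L' :: pvRep t else c :: pvRep (d :: t)

-- abstract run of A's loop: (chars, answer, stack depth) ↦ final (answer, depth), none = IndexError
def pvRunA : List Char → Int → Nat → Option (Int × Nat)
  | [], a, n => some (a, n)
  | c :: t, a, n =>
    if c = '(' then pvRunA t (a + 1) (n + 1)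
    else if c = ')' then if n = 0 then none else pvRunA t a (n - 1)
    else pvRunA t (a + (n : Int)) n

theorem pvFoldA_none (l : List Char) : l.foldl pvStepA none = none := by
  induction l with
  | nil => rfl
  | cons c t ih => simpa [pvStepA] using ih

theorem pvPopReplicate (n : Nat) :
    PySem.List.pop? (List.replicate (n + 1) '(') = some ('(', List.replicate n '(') := by
  simp [PySem.List.pop?, PySem.List.pyIdx?, List.eraseIdx_eq_take_drop_succ]

theorem pvFoldA_eq (l : List Char) : ∀ (a : Int) (n : Nat),
    l.foldl pvStepA (some (a, List.replicate n '(')) =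
      (pvRunA l a n).map (fun p => (p.1, List.replicate p.2 '(')) := by
  induction l with
  | nil => intro a n; simp [pvRunA]
  | cons c t ih =>
    intro a n
    by_cases hc : c = '('
    · simpa [pvStepA, pvRunA, hc, ← List.replicate_succ'] using ih (a + 1) (n + 1)
    · by_cases hd : c = ')'
      · cases n with
        | zero => simp [pvStepA, pvRunA, hd, PySem.List.pop?, PySem.List.pyIdx?, pvFoldA_none]
        | succ m =>
          simpa [pvStepA, pvRunA, hc, hd, pvPopReplicate] using ih a m
      · simpa [pvStepA, pvRunA, hc, hd] using ih (a + n) n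

-- the replace.go worker with enough fuel computes pvRep
theorem pvGo_eq (fuel : Nat) : ∀ (l acc : List Char), l.length ≤ fuel →
    PySem.Chars.replace.go ['(', ')'] ['L'] fuel l acc = acc.reverse ++ pvRep l := by
  induction fuel with
  | zero =>
    intro l acc h
    have hl : l = [] := List.length_eq_zero_iff.mp (Nat.le_zero.mp h)
    subst hl
    simp [PySem.Chars.replace.go, pvRep]
  | succ f ih =>
    intro l acc h
    match l with
    | [] => simp [PySem.Chars.replace.go, pvRep]
    | [c] =>
      by_cases hc : c = '('
      · subst hc
        simp [PySem.Chars.replace.go, List.isPrefixOf, pvRep, ih [] ('(' :: acc) (by simp)]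
      · simp [PySem.Chars.replace.go, List.isPrefixOf, pvRep, ih [] (c :: acc) (by simp)]
    | c :: d :: t =>
      simp only [List.length_cons] at h
      by_cases hp : c = '(' ∧ d = ')'
      · obtain ⟨rfl, rfl⟩ := hp
        have := ih t ('L' :: acc) (by omega)
        simp [PySem.Chars.replace.go, List.isPrefixOf, pvRep, this]
      · have hpre : List.isPrefixOf ['(', ')'] (c :: d :: t) = false := by
          simp only [List.isPrefixOf, Bool.and_eq_false_iff]
          rcases Decidable.not_and_iff_or_not.mp hp with h1 | h1
          · left; simpa [beq_iff_eq] using fun h => h1 h.symm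
          · right; left; simpa [beq_iff_eq] using fun h => h1 h.symm
        have := ih (d :: t) (c :: acc) (by simp; omega)
        simp [PySem.Chars.replace.go, hpre, this, pvRep, if_neg hp]

theorem pvReplace_eq (s : String) :
    (PySem.Str.replace s "()" "L").toList = pvRep s.toList := by
  rw [PySem.Str.toList_replace, show "()".toList = ['(', ')'] from rfl,
    show "L".toList = ['L'] from rfl, PySem.Chars.replace]
  simpa using pvGo_eq s.toList.length s.toList [] le_rfl

theorem pvRunA_cons (c : Char) (t : List Char) (a : Int) (n : Nat) :
    pvRunA (c :: t) a n =
      (if c = '(' then pvRunA t (a + 1) (n + 1)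
       else if c = ')' then (if n = 0 then none else pvRunA t a (n - 1))
       else pvRunA t (a + (n : Int)) n) := rfl

-- one-step rewrite lemmas for B's loop
theorem pvLoopB_open (t : List Char) (p : Option Char) (d a : Int) :
    pvLoopB ('(' :: t) p d a = pvLoopB t (some '(') (d + 1) (a + 1) := by
  simp [pvLoopB]

theorem pvLoopB_close (t : List Char) (p : Option Char) (d a : Int) :
    pvLoopB (')' :: t) p d a =
      pvLoopB t (some ')') (d - 1) (if p = some '(' then a + ((d - 1) - 1) else a) := by
  simp [pvLoopB]

theorem pvLoopB_other (c : Char) (t : List Char) (p : Option Char) (d a : Int)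
    (hc : ¬ c = '(') (hd : ¬ c = ')') :
    pvLoopB (c :: t) p d a = pvLoopB t (some c) d (a + d) := by
  simp [pvLoopB, hc, hd]

-- SUCCESS: the prefix-count condition (with n opens in credit) keeps A's run from failing
theorem pvSucc (cs : List Char) : ∀ (a : Int) (n : Nat),
    (∀ i < cs.length, cs.getD i ' ' = ')' →
      (cs.take i).count ')' < n + (cs.take i).count '(') →
    pvRunA (pvRep cs) a n ≠ none := by
  induction cs using pvRep.induct with
  | case1 => intro a n _; simp [pvRep, pvRunA]
  | case2 c =>
    intro a n h
    by_cases hc : c = '('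
    · simp [pvRep, pvRunA, hc]
    · by_cases hd : c = ')'
      · have h0 := h 0 (by simp) (by simp [hd])
        simp only [List.take_zero, List.count_nil] at h0
        have hn : ¬ n = 0 := by omega
        simp [pvRep, pvRunA, hd, hn]
      · simp [pvRep, pvRunA, hc, hd]
  | case3 c d t hpair ih =>
    intro a n h
    obtain ⟨rfl, rfl⟩ := hpair
    rw [show pvRep ('(' :: ')' :: t) = 'L' :: pvRep t from by simp [pvRep]]
    rw [pvRunA_cons]
    simp only [reduceIte, Char.reduceEq]
    refine ih (a + n) n (fun i hi hci => ?_)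
    have h2 := h (i + 2) (by simp only [List.length_cons] at hi ⊢; omega)
      (by simp only [List.getD_cons_succ]; exact hci)
    simp only [List.take_succ_cons, List.count_cons] at h2
    simp at h2
    omega
  | case4 c d t hpair ih =>
    intro a n h
    rw [show pvRep (c :: d :: t) = c :: pvRep (d :: t) from by rw [pvRep, if_neg hpair]]
    rw [pvRunA_cons]
    by_cases hc : c = '('
    · subst hc
      simp only [reduceIte]
      refine ih (a + 1) (n + 1) (fun i hi hci => ?_)
      have h2 := h (i + 1) (by simp only [List.length_cons] at hi ⊢; omega)
        (by simp only [List.getD_cons_succ]; exact hci)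
      simp only [List.take_succ_cons, List.count_cons] at h2
      simp at h2
      omega
    · by_cases hd : c = ')'
      · subst hd
        have h0 := h 0 (by simp) (by simp)
        simp only [List.take_zero, List.count_nil] at h0
        have hn : ¬ n = 0 := by omega
        simp only [reduceIte, Char.reduceEq, if_neg hn]
        refine ih a (n - 1) (fun i hi hci => ?_)
        have h2 := h (i + 1) (by simp only [List.length_cons] at hi ⊢; omega)
          (by simp only [List.getD_cons_succ]; exact hci)
        simp only [List.take_succ_cons, List.count_cons] at h2
        simp at h2
        omega
      · simp only [if_neg hc, if_neg hd]
        refine ih (a + n) n (fun i hi hci => ?_)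
        have h2 := h (i + 1) (by simp only [List.length_cons] at hi ⊢; omega)
          (by simp only [List.getD_cons_succ]; exact hci)
        simp only [List.take_succ_cons, List.count_cons] at h2
        simp at h2
        by_cases hcl : c = ')' <;> simp [hc, hcl] at h2 ⊢ <;> omega

-- CORE: whenever A's run over the laser-collapsed string succeeds, B's loop over the original
-- string with the same accumulator produces A's answer (p is the previous original character).
theorem pvAgree (cs : List Char) : ∀ (a : Int) (n : Nat) (p : Option Char),
    (p = some '(' → cs.head? ≠ some ')') →
    ∀ r, pvRunA (pvRep cs) a n = some r → pvLoopB cs p (n : Int) a = r.1 := by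
  induction cs using pvRep.induct with
  | case1 =>
    intro a n p _ r hr
    simp only [pvRep, pvRunA, Option.some_inj] at hr
    simp [pvLoopB, ← hr]
  | case2 c =>
    intro a n p hp r hr
    obtain ⟨r1, r2⟩ := r
    by_cases hc : c = '('
    · subst hc
      simp only [pvRep, pvRunA, reduceIte, Option.some_inj, Prod.mk.injEq] at hr
      rw [pvLoopB_open]
      simpa [pvLoopB] using hr.1
    · by_cases hd : c = ')'
      · subst hd
        have hp' : ¬ p = some '(' := fun h => (hp h) (by simp)
        cases n with
        | zero => simp [pvRep, pvRunA] at hr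
        | succ m =>
          simp only [pvRep, pvRunA, reduceIte, Char.reduceEq, Nat.succ_ne_zero, if_false,
            Nat.add_sub_cancel, Option.some_inj, Prod.mk.injEq] at hr
          rw [pvLoopB_close, if_neg hp']
          simpa [pvLoopB] using hr.1
      · simp only [pvRep, pvRunA, if_neg hc, if_neg hd, Option.some_inj, Prod.mk.injEq] at hr
        rw [pvLoopB_other c [] p _ _ hc hd]
        simpa [pvLoopB] using hr.1
  | case3 c d t hpair ih =>
    intro a n p _ r hr
    obtain ⟨rfl, rfl⟩ := hpair
    rw [show pvRep ('(' :: ')' :: t) = 'L' :: pvRep t from by simp [pvRep]] at hr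
    rw [pvRunA_cons] at hr
    simp only [reduceIte, Char.reduceEq] at hr
    rw [pvLoopB_open, pvLoopB_close, if_pos rfl]
    rw [show (n : Int) + 1 - 1 = (n : Int) from by ring]
    rw [show a + 1 + ((n : Int) - 1) = a + (n : Int) from by ring]
    exact ih (a + (n : Int)) n (some ')') (by simp) r hr
  | case4 c d t hpair ih =>
    intro a n p hp r hr
    rw [show pvRep (c :: d :: t) = c :: pvRep (d :: t) from by rw [pvRep, if_neg hpair]] at hr
    rw [pvRunA_cons] at hr
    by_cases hc : c = '('
    · subst hc
      have hd' : ¬ d = ')' := fun h => hpair ⟨rfl, h⟩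
      simp only [reduceIte] at hr
      have h1 := ih (a + 1) (n + 1) (some '(') (by simp [hd']) r hr
      rw [pvLoopB_open]
      push_cast at h1 ⊢
      exact h1
    · by_cases hd : c = ')'
      · subst hd
        have hp' : ¬ p = some '(' := fun h => (hp h) (by simp)
        cases n with
        | zero => simp at hr
        | succ m =>
          simp only [reduceIte, Char.reduceEq, Nat.succ_ne_zero, if_false,
            Nat.add_sub_cancel] at hr
          have h1 := ih a m (some ')') (by simp) r hr
          rw [pvLoopB_close, if_neg hp']
          rw [show ((m + 1 : Nat) : Int) - 1 = (m : Int) from by push_cast; ring]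
          exact h1
      · simp only [if_neg hc, if_neg hd] at hr
        rw [pvLoopB_other c _ p _ _ hc hd]
        exact ih (a + (n : Int)) n (some c) (by simp [hc]) r hr

theorem pvPorts_eq (s : String) (hpre : Pre_solution s) : solution s = solution_alt s := by
  simp only [solution, solution_alt]
  rw [pvReplace_eq]
  have hs : pvRunA (pvRep s.toList) 0 0 ≠ none := by
    refine pvSucc s.toList 0 0 (fun i hi hci => ?_)
    simpa using hpre i hi hci
  obtain ⟨r, hr⟩ := Option.ne_none_iff_exists'.mp hs
  have hagree := pvAgree s.toList 0 0 none (by simp) r hr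
  have hA := pvFoldA_eq (pvRep s.toList) 0 0
  simp only [List.replicate_zero] at hA
  rw [hA, hr]
  simpa using hagree.symm

-- ===== VERDICT (by name: the statement is the Claim_ definition above) =====
theorem solution_spec : Claim_equal_solution := by
  intro s _ hpre
  unfold Spec_solution
  exact pvPorts_eq s hpre
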